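-- pv_equiv track=rewrite | github.com/Paalar/TDT4117 | Oving3/run_me.py | removeParagraphsContaining
-- ===== SOURCE A (Python) =====
-- wordsToBeRemoved = ['gutenberg']
--
-- def removeParagraphsContaining(paragraph):
--     counter = 0
--     for word in paragraph:
--         for badword in wordsToBeRemoved:
--             word = word.lower()
--             if badword in word:
--                 counter += 1
--     return counter == 0
-- ===== SOURCE B (Python) =====
-- wordsToBeRemoved = ['gutenberg']
--
-- def removeParagraphsContaining(paragraph):
--     text = ' '.join(paragraph).lower()
--     return not any(bad in text for bad in wordsToBeRemoved)
-- ===== Notes on version B (the rewrite author's own statement) =====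
-- stated objective: simpler
-- what changed: B joins the whole paragraph into one lowercase string with a space separator and does a single substring test per bad word, instead of A's nested per-word/per-badword counting loop; the space separator (absent from every bad word) guarantees a match cannot span a word boundary.
import Mathlib
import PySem

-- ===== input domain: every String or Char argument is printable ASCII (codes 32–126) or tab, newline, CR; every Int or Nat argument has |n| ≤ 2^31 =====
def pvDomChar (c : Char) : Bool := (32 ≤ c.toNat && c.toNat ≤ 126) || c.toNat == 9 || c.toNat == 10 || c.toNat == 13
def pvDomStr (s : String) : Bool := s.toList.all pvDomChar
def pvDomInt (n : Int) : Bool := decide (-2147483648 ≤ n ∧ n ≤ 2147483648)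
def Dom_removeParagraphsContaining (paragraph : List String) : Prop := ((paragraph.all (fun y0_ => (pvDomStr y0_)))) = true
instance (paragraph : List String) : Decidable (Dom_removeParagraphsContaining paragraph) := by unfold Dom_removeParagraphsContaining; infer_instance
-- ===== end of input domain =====

-- B replaces A's nested per-word/per-badword counting loop by one substring test per bad word
-- on the space-joined lowercased paragraph (objective: simpler).


-- ===== PORT A =====
def wordsToBeRemoved : List String := ["gutenberg"]

-- the inner loop reassigns `word` (word = word.lower()), so its state is (counter, word)
def removeParagraphsContaining (paragraph : List String) : Bool :=
  let counter : Int :=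
    paragraph.foldl (fun counter word =>
      (wordsToBeRemoved.foldl
        (fun (st : Int × String) badword =>
          let word := PySem.Str.lower st.2
          if PySem.Str.isIn badword word then (st.1 + 1, word) else (st.1, word))
        (counter, word)).1) 0
  counter == 0

-- ===== PORT B =====
def removeParagraphsContaining_alt (paragraph : List String) : Bool :=
  let text := PySem.Str.lower (PySem.Str.join " " paragraph)
  !(wordsToBeRemoved.any fun bad => PySem.Str.isIn bad text)

-- ===== PRECONDITION & SPEC =====
def Spec_removeParagraphsContaining (paragraph : List String) (out : Bool) : Prop := out = removeParagraphsContaining_alt paragraph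
instance (paragraph : List String) (out : Bool) : Decidable (Spec_removeParagraphsContaining paragraph out) := by unfold Spec_removeParagraphsContaining; infer_instance

-- ===== CLAIM (what is proved, stated in full; the proofs are below) =====
def Claim_equal_removeParagraphsContaining : Prop := ∀ (paragraph : List String), Dom_removeParagraphsContaining paragraph → Spec_removeParagraphsContaining paragraph (removeParagraphsContaining paragraph)

-- ===== LEMMAS AND PROOFS =====

-- a pattern that avoids a character c matches in xs ++ c :: ys iff it matches in xs or in ys
lemma pv_infix_split {α : Type} (c : α) (g xs ys : List α) (hc : c ∉ g) :
    g <:+: xs ++ c :: ys ↔ g <:+: xs ∨ g <:+: ys := by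
  constructor
  · rintro ⟨s, t, h⟩
    rw [List.append_assoc] at h
    rcases List.append_eq_append_iff.mp h with ⟨a, hxs, hb⟩ | ⟨b, hs, hd⟩
    · rcases List.append_eq_append_iff.mp hb with ⟨e, ha, ht⟩ | ⟨e, hg, he⟩
      · exact Or.inl ⟨s, e, by rw [hxs, ha, List.append_assoc]⟩
      · cases e with
        | nil => exact Or.inl ⟨s, [], by simp [hxs, hg]⟩
        | cons e0 e' =>
          exfalso
          have : e0 = c := by
            have := congrArg (fun l => l.head?) he
            simpa using this.symm
          exact hc (by rw [hg, this]; simp)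
    · cases b with
      | nil =>
        cases g with
        | nil => exact Or.inl List.nil_infix
        | cons g0 g' =>
          exfalso
          have : g0 = c := by
            have := congrArg (fun l => l.head?) hd
            simpa using this.symm
          exact hc (by rw [this]; simp)
      | cons b0 b' =>
        have hb0 : b0 = c ∧ ys = b' ++ (g ++ t) := by
          have := hd
          simp at this
          exact ⟨this.1.symm, this.2⟩
        exact Or.inr ⟨b', t, by rw [hb0.2, List.append_assoc]⟩
  · rintro (h | h)
    · exact h.trans ((List.prefix_append xs (c :: ys)).isInfix)
    · exact h.trans (((List.suffix_cons c ys).trans (List.suffix_append_of_suffix (List.suffix_refl _))).isInfix)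

-- lowercasing commutes with the space-join (lowerChar ' ' = ' ')
lemma pv_lower_join : ∀ ps : List (List Char),
    PySem.Chars.lower (PySem.Chars.join [' '] ps) = PySem.Chars.join [' '] (ps.map PySem.Chars.lower)
  | [] => by simp [PySem.Chars.join_nil, PySem.Chars.lower]
  | [p] => by simp [PySem.Chars.join_singleton]
  | p :: q :: r => by
    have ih := pv_lower_join (q :: r)
    rw [PySem.Chars.join_cons_cons, List.map_cons, List.map_cons, PySem.Chars.join_cons_cons,
      ← List.map_cons, ← ih]
    simp [PySem.Chars.lower, show PySem.Chars.lowerChar ' ' = ' ' from by decide]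

-- a nonempty space-free pattern matches in the space-join iff it matches in some part
lemma pv_infix_join (g : List Char) (hg : g ≠ []) (hc : ' ' ∉ g) :
    ∀ ps : List (List Char), (g <:+: PySem.Chars.join [' '] ps ↔ ∃ p ∈ ps, g <:+: p)
  | [] => by simp [PySem.Chars.join_nil, List.infix_nil, hg]
  | [p] => by simp [PySem.Chars.join_singleton]
  | p :: q :: r => by
    rw [PySem.Chars.join_cons_cons, List.append_assoc]
    rw [show ([' '] ++ PySem.Chars.join [' '] (q :: r)) = ' ' :: PySem.Chars.join [' '] (q :: r) from rfl]
    rw [pv_infix_split ' ' g p _ hc, pv_infix_join g hg hc (q :: r)]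
    simp

-- ===== VERDICT (by name: the statement is the Claim_ definition above) =====
theorem removeParagraphsContaining_spec : Claim_equal_removeParagraphsContaining := by
  intro paragraph _
  unfold Spec_removeParagraphsContaining removeParagraphsContaining removeParagraphsContaining_alt wordsToBeRemoved
  simp only [List.foldl_cons, List.foldl_nil, List.any_cons, List.any_nil, Bool.or_false]
  rw [show (fun (counter : Int) (word : String) =>
        (let word' := PySem.Str.lower word;
         if PySem.Str.isIn "gutenberg" word' then (counter + 1, word') else (counter, word')).1)
      = fun counter word =>
        if PySem.Str.isIn "gutenberg" (PySem.Str.lower word) then counter + 1 else counter from by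
    funext counter word
    split <;> simp_all]
  rw [PySem.List.foldl_count_if (fun word => PySem.Str.isIn "gutenberg" (PySem.Str.lower word)) paragraph 0]
  rw [Bool.eq_iff_iff]
  have hchain : PySem.Str.isIn "gutenberg" (PySem.Str.lower (PySem.Str.join " " paragraph)) = true
      ↔ ∃ w ∈ paragraph, PySem.Str.isIn "gutenberg" (PySem.Str.lower w) = true := by
    rw [PySem.Str.isIn_eq, PySem.Chars.isIn_iff_infix, PySem.Str.toList_lower, PySem.Str.toList_join]
    rw [show (" ".toList) = [' '] from rfl, pv_lower_join]
    rw [pv_infix_join "gutenberg".toList (by decide) (by decide)]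
    constructor
    · rintro ⟨p, hp, hinf⟩
      rw [List.map_map, List.mem_map] at hp
      obtain ⟨w, hw, rfl⟩ := hp
      exact ⟨w, hw, by rw [PySem.Str.isIn_eq, PySem.Str.toList_lower, PySem.Chars.isIn_iff_infix]; exact hinf⟩
    · rintro ⟨w, hw, hin⟩
      refine ⟨PySem.Chars.lower w.toList, ?_, ?_⟩
      · rw [List.map_map, List.mem_map]; exact ⟨w, hw, rfl⟩
      · rw [PySem.Str.isIn_eq, PySem.Str.toList_lower, PySem.Chars.isIn_iff_infix] at hin; exact hin
  constructor
  · intro hA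
    rw [beq_iff_eq] at hA
    have hcnt : List.countP (fun word => PySem.Str.isIn "gutenberg" (PySem.Str.lower word)) paragraph = 0 := by
      omega
    rw [Bool.not_eq_true', Bool.eq_false_iff]
    intro hx
    obtain ⟨w, hw, hin⟩ := hchain.mp hx
    exact absurd hin (List.countP_eq_zero.mp hcnt w hw)
  · intro hB
    have hxf : PySem.Str.isIn "gutenberg" (PySem.Str.lower (PySem.Str.join " " paragraph)) = false := by
      simpa using hB
    have hnex : ¬ ∃ w ∈ paragraph, PySem.Str.isIn "gutenberg" (PySem.Str.lower w) = true := by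
      intro hex
      rw [hchain.mpr hex] at hxf
      exact Bool.noConfusion hxf
    have hcnt : List.countP (fun word => PySem.Str.isIn "gutenberg" (PySem.Str.lower word)) paragraph = 0 :=
      List.countP_eq_zero.mpr (fun w hw hin => hnex ⟨w, hw, hin⟩)
    rw [hcnt]
    rfl
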